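-- pv_equiv track=rewrite | github.com/Tesfamariam-21/A2SV--CompetitiveProgramming | 1768-merge-strings-alternately/1768-merge-strings-alternately.py | mergeAlternately
-- ===== SOURCE A (Python) =====
-- def mergeAlternately(word1: str, word2: str) -> str:
--     pointer1 = 0
--     pointer2 = 0
--     string = ""
--
--     size = len(word1) if len(word1) > len(word2) else len(word2)
--
--     for _ in range(size):
--         if(pointer1 < len(word1)):
--             string += word1[pointer1]
--             pointer1 += 1
--         if(pointer2 < len(word2)):
--             string += word2[pointer2]
--             pointer2 += 1
--
--     return string
-- ===== SOURCE B (Python) =====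
-- def mergeAlternately(word1: str, word2: str) -> str:
--     merged = ''.join(a + b for a, b in zip(word1, word2))
--     return merged + word1[len(word2):] + word2[len(word1):]
-- ===== Notes on version B (the rewrite author's own statement) =====
-- stated objective: idiomatic
-- what changed: Replaces A's single max-length loop with two per-iteration bounds checks, pointers and += string building by a zip-based join of the common prefix plus one slice for the leftover tail of the longer word.
import Mathlib
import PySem

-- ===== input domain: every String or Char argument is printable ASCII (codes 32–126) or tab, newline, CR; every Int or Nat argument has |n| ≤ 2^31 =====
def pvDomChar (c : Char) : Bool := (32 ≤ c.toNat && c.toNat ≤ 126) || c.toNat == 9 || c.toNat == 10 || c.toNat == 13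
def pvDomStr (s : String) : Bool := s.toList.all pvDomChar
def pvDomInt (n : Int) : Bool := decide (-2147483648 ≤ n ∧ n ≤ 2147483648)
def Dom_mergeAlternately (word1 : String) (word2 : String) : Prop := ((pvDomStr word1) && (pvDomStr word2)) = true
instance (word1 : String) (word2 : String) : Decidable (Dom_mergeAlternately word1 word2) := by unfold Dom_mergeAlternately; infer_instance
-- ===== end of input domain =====

-- B rewrites A's guarded max-length pointer loop as an interleave of zip(word1, word2)
-- plus one slice for the leftover tail of the longer word (idiomatic; same cost).

-- ===== PORT A =====
-- A's for-loop over range(size) with state (pointer1, pointer2, string),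
-- as structural recursion on the remaining iteration count.
def mergeAlternatelyLoopA (w1 w2 : List Char) : Nat → Nat → List Char → Nat → List Char
  | _, _, acc, 0 => acc
  | p1, p2, acc, n + 1 =>
    let s1 := if p1 < w1.length then (p1 + 1, acc ++ [w1.getD p1 ' ']) else (p1, acc)
    let s2 := if p2 < w2.length then (p2 + 1, s1.2 ++ [w2.getD p2 ' ']) else (p2, s1.2)
    mergeAlternatelyLoopA w1 w2 s1.1 s2.1 s2.2 n

def mergeAlternately (word1 : String) (word2 : String) : String :=
  let w1 := word1.toList
  let w2 := word2.toList
  let size := if w1.length > w2.length then w1.length else w2.length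
  String.ofList (mergeAlternatelyLoopA w1 w2 0 0 [] size)

-- ===== PORT B =====
-- merged = ''.join(a + b for a, b in zip(word1, word2))
-- return merged + word1[len(word2):] + word2[len(word1):]   (the slices ported as drop: both bounds are ≥ 0)
def mergeAlternately_alt (word1 : String) (word2 : String) : String :=
  let w1 := word1.toList
  let w2 := word2.toList
  let merged := (w1.zip w2).flatMap (fun p => [p.1, p.2])
  String.ofList (merged ++ w1.drop w2.length ++ w2.drop w1.length)

-- ===== PRECONDITION & SPEC =====
def Spec_mergeAlternately (word1 : String) (word2 : String) (out : String) : Prop := out = mergeAlternately_alt word1 word2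
instance (word1 : String) (word2 : String) (out : String) : Decidable (Spec_mergeAlternately word1 word2 out) := by unfold Spec_mergeAlternately; infer_instance

-- ===== CLAIM (what is proved, stated in full; the proofs are below) =====
def Claim_equal_mergeAlternately : Prop := ∀ (word1 : String) (word2 : String), Dom_mergeAlternately word1 word2 → Spec_mergeAlternately word1 word2 (mergeAlternately word1 word2)

-- ===== LEMMAS AND PROOFS =====

-- Reference merge: take one char from each (when available), n times.
def tm : Nat → List Char → List Char → List Char
  | 0, _, _ => []
  | n + 1, a, b => a.take 1 ++ b.take 1 ++ tm n a.tail b.tail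

theorem tm_nil_left : ∀ (n : Nat) (b : List Char), tm n [] b = b.take n := by
  intro n
  induction n with
  | zero => intro b; simp [tm]
  | succ n ih =>
    intro b
    cases b with
    | nil => simp [tm, ih]
    | cons y ys => simp [tm, ih, List.take_succ_cons]

theorem tm_nil_right : ∀ (n : Nat) (a : List Char), tm n a [] = a.take n := by
  intro n
  induction n with
  | zero => intro a; simp [tm]
  | succ n ih =>
    intro a
    cases a with
    | nil => simp [tm, ih]
    | cons x xs => simp [tm, ih, List.take_succ_cons]

theorem loopA_eq_tm (w1 w2 : List Char) :
    ∀ (n p1 p2 : Nat) (acc : List Char),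
      mergeAlternatelyLoopA w1 w2 p1 p2 acc n = acc ++ tm n (w1.drop p1) (w2.drop p2) := by
  intro n
  induction n with
  | zero => intro p1 p2 acc; simp [mergeAlternatelyLoopA, tm]
  | succ n ih =>
    intro p1 p2 acc
    simp only [mergeAlternatelyLoopA]
    by_cases h1 : p1 < w1.length <;> by_cases h2 : p2 < w2.length <;>
        simp only [h1, h2, if_true, if_false, ih, tm, List.tail_drop]
    · rw [List.take_one_drop_eq_of_lt_length h1, List.take_one_drop_eq_of_lt_length h2,
          List.getD_eq_getElem _ _ h1, List.getD_eq_getElem _ _ h2]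
      simp
    · rw [List.take_one_drop_eq_of_lt_length h1, List.getD_eq_getElem _ _ h1,
          List.drop_eq_nil_of_le (Nat.le_of_not_lt h2),
          List.drop_eq_nil_of_le (le_trans (Nat.le_of_not_lt h2) (Nat.le_succ _))]
      simp
    · rw [List.take_one_drop_eq_of_lt_length h2, List.getD_eq_getElem _ _ h2,
          List.drop_eq_nil_of_le (Nat.le_of_not_lt h1),
          List.drop_eq_nil_of_le (le_trans (Nat.le_of_not_lt h1) (Nat.le_succ _))]
      simp
    · rw [List.drop_eq_nil_of_le (Nat.le_of_not_lt h1), List.drop_eq_nil_of_le (Nat.le_of_not_lt h2),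
          List.drop_eq_nil_of_le (le_trans (Nat.le_of_not_lt h1) (Nat.le_succ _)),
          List.drop_eq_nil_of_le (le_trans (Nat.le_of_not_lt h2) (Nat.le_succ _))]
      simp

theorem tm_max_eq (a : List Char) :
    ∀ (b : List Char),
      tm (max a.length b.length) a b
        = (a.zip b).flatMap (fun p => [p.1, p.2]) ++ a.drop b.length ++ b.drop a.length := by
  induction a with
  | nil =>
    intro b
    simp [tm_nil_left]
  | cons x xs ih =>
    intro b
    cases b with
    | nil => simp [tm_nil_right]
    | cons y ys =>
      have : max (x :: xs).length (y :: ys).length = max xs.length ys.length + 1 := by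
        simp [Nat.succ_max_succ]
      rw [this]
      simp [tm, ih ys]

-- ===== VERDICT (by name: the statement is the Claim_ definition above) =====
theorem mergeAlternately_spec : Claim_equal_mergeAlternately := by
  intro word1 word2 _
  unfold Spec_mergeAlternately mergeAlternately mergeAlternately_alt
  simp only []
  rw [loopA_eq_tm _ _ _ 0 0 []]
  have hsize : (if word1.toList.length > word2.toList.length then word1.toList.length
      else word2.toList.length) = max word1.toList.length word2.toList.length := by
    split <;> omega
  rw [hsize, List.drop_zero, List.drop_zero, tm_max_eq]
  simp [List.append_assoc]
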